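-- pv_equiv track=rewrite | github.com/Gab-23/snaketrack | scripts/track_changes.py | identify_wildcards
-- ===== SOURCE A (Python) =====
-- def identify_wildcards(values, ranges, cumulative_idx = 0):
--     not_bool_opening = "{" not in values
--     not_bool_closing = "}" not in values
--     if not_bool_opening and not_bool_closing:
--         return ranges
--     else:
--         opening = values.index("{")
--         closing = values.index("}")
--         if opening < closing:
--             ranges.append((opening+cumulative_idx, closing+cumulative_idx+1))
--         else:
--             pass
--         break_idx = closing+1
--         cumulative_idx = cumulative_idx + break_idx
--         values = values[break_idx:]
--         return identify_wildcards(values, ranges, cumulative_idx)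
-- ===== SOURCE B (Python) =====
-- def identify_wildcards(values, ranges, cumulative_idx=0):
--     # Single left-to-right scan; note: appends to `ranges` in place, like A.
--     open_pos = None
--     for i, ch in enumerate(values):
--         if ch == "{":
--             if open_pos is None:
--                 open_pos = i
--         elif ch == "}":
--             if open_pos is not None:
--                 ranges.append((open_pos + cumulative_idx, i + cumulative_idx + 1))
--             open_pos = None
--     return ranges
-- ===== Notes on version B (the rewrite author's own statement) =====
-- stated objective: simpler
-- what changed: Replaces A's recursion that re-slices the string and re-searches both braces after every '}' with a single left-to-right scan over the characters that tracks the position of the pending '{'; no slicing, no recursion, and no exception path.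
import Mathlib
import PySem

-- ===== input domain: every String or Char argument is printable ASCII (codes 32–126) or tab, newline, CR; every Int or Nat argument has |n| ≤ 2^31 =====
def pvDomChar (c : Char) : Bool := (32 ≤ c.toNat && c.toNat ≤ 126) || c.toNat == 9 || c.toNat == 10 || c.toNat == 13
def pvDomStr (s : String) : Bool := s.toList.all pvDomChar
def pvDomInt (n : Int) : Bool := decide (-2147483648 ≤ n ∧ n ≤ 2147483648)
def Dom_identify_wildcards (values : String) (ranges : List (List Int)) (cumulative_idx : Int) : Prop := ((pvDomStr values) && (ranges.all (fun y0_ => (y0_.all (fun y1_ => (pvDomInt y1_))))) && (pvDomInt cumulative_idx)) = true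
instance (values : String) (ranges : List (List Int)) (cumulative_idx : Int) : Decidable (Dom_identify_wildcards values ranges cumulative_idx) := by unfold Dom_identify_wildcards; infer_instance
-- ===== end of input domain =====

-- B replaces A's recursive slice-and-re-search with one left-to-right scan tracking the pending '{' position.
-- Both Pythons mutate `ranges` in place by appending the same pairs; the theorems here are about the return value.

-- ===== PORT A =====
-- A recurses on the suffix after the first '}'; str.index("{") on a one-char needle = index? of that
-- char in the char list; values[break_idx:] with 0 ≤ break_idx = drop. A raises ValueError when some
-- recursion step sees exactly one of '{', '}' (str.index of a missing char): those inputs are outside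
-- Pre_ and the port returns the current `ranges` there (arbitrary).
def aGo (chars : List Char) (ranges : List (List Int)) (cumulative_idx : Int) : List (List Int) :=
  if (!chars.contains '{') && (!chars.contains '}') then ranges
  else
    match h : PySem.List.index? chars '{', h2 : PySem.List.index? chars '}' with
    | some opening, some closing =>
      let ranges' := if (opening : Int) < (closing : Int)
        then ranges ++ [[(opening : Int) + cumulative_idx, (closing : Int) + cumulative_idx + 1]]
        else ranges
      aGo (chars.drop (closing + 1)) ranges' (cumulative_idx + (closing + 1))
    | _, _ => ranges  -- Python raises ValueError here; excluded by Pre_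
termination_by chars.length
decreasing_by
  obtain ⟨hk, -, -⟩ := PySem.List.getElem_of_index?_eq_some h2
  simp only [List.length_drop]
  omega

def identify_wildcards (values : String) (ranges : List (List Int)) (cumulative_idx : Int) : List (List Int) :=
  aGo values.toList ranges cumulative_idx

-- ===== PORT B =====
-- B's for-loop over enumerate(values): structural recursion carrying the running index i, the
-- pending open-brace index `op` (Python's open_pos; `op.getD i` = "keep open_pos if set, else i")
-- and the accumulated list (at '}', append [o+cum, i+cum+1] if open_pos is set).
def altGo : List Char → Int → Int → Option Int → List (List Int) → List (List Int)
  | [], _, _, _, acc => acc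
  | ch :: rest, i, cumulative_idx, op, acc =>
    if ch = '{' then
      altGo rest (i + 1) cumulative_idx (some (op.getD i)) acc
    else if ch = '}' then
      altGo rest (i + 1) cumulative_idx none
        (acc ++ (op.map (fun o => [o + cumulative_idx, i + cumulative_idx + 1])).toList)
    else altGo rest (i + 1) cumulative_idx op acc

def identify_wildcards_alt (values : String) (ranges : List (List Int)) (cumulative_idx : Int) : List (List Int) :=
  altGo values.toList 0 cumulative_idx none ranges

-- ===== PRECONDITION & SPEC =====
-- A returns normally iff, restricted to its braces, the string is empty or ends with "…{}" (a '{'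
-- directly before the final '}' in the brace subsequence); on every other input A raises ValueError
-- (str.index of a brace missing from the current suffix), so exactly those inputs are excluded.
def preOk (t : List Char) : Bool :=
  t.isEmpty || (t.reverse.take 2 == ['}', '{'])

def braceFilter (chars : List Char) : List Char :=
  chars.filter (fun c => c == '{' || c == '}')

def Pre_identify_wildcards (values : String) (ranges : List (List Int)) (cumulative_idx : Int) : Prop :=
  preOk (braceFilter values.toList) = true

instance (values : String) (ranges : List (List Int)) (cumulative_idx : Int) : Decidable (Pre_identify_wildcards values ranges cumulative_idx) := by unfold Pre_identify_wildcards; infer_instance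

def pvWitness_identify_wildcards : String × List (List Int) × Int := ("a{b}c{d}", [[0, 1]], 5)

def Spec_identify_wildcards (values : String) (ranges : List (List Int)) (cumulative_idx : Int) (out : List (List Int)) : Prop := out = identify_wildcards_alt values ranges cumulative_idx
instance (values : String) (ranges : List (List Int)) (cumulative_idx : Int) (out : List (List Int)) : Decidable (Spec_identify_wildcards values ranges cumulative_idx out) := by unfold Spec_identify_wildcards; infer_instance

-- ===== CLAIM (what is proved, stated in full; the proofs are below) =====
def Claim_equal_identify_wildcards : Prop := ∀ (values : String) (ranges : List (List Int)) (cumulative_idx : Int), Dom_identify_wildcards values ranges cumulative_idx → Pre_identify_wildcards values ranges cumulative_idx → Spec_identify_wildcards values ranges cumulative_idx (identify_wildcards values ranges cumulative_idx)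


-- ===== LEMMAS AND PROOFS =====

-- Only the sums index+cumulative matter to altGo: shifting index into cumulative offset is invisible.
lemma altGo_abs (l : List Char) : ∀ (i cum i' cum' : Int) (op op' : Option Int)
    (acc : List (List Int)),
    i + cum = i' + cum' →
    op.map (· + cum) = op'.map (· + cum') →
    altGo l i cum op acc = altGo l i' cum' op' acc := by
  induction l with
  | nil => intro _ _ _ _ _ _ _ _ _; simp [altGo]
  | cons ch rest ih =>
    intro i cum i' cum' op op' acc hi hop
    by_cases hc : ch = '{'
    · simp only [altGo, if_pos hc]
      cases op with
      | none =>
        cases op' with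
        | none =>
          exact ih (i + 1) cum (i' + 1) cum' (some i) (some i') acc (by omega) (by simp; omega)
        | some o' => simp at hop
      | some o =>
        cases op' with
        | none => simp at hop
        | some o' =>
          simp only [Option.map_some, Option.some.injEq] at hop
          exact ih (i + 1) cum (i' + 1) cum' (some o) (some o') acc (by omega) (by simp; omega)
    · by_cases hc2 : ch = '}'
      · simp only [altGo, if_neg hc, if_pos hc2]
        cases op with
        | none =>
          cases op' with
          | none => exact ih (i + 1) cum (i' + 1) cum' none none _ (by omega) rfl
          | some o' => simp at hop
        | some o =>
          cases op' with
          | none => simp at hop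
          | some o' =>
            simp only [Option.map_some, Option.some.injEq] at hop
            simp only [Option.map_some, Option.toList_some]
            rw [show o + cum = o' + cum' from hop, show i + cum + 1 = i' + cum' + 1 by omega]
            exact ih (i + 1) cum (i' + 1) cum' none none _ (by omega) rfl
      · simp only [altGo, if_neg hc, if_neg hc2]
        exact ih (i + 1) cum (i' + 1) cum' op op' acc (by omega) hop

-- firstBrace pre i: index (offset by i) of the first '{' of pre.
def firstBrace : List Char → Int → Option Int
  | [], _ => none
  | c :: r, i => if c = '{' then some i else firstBrace r (i + 1)

-- With the pending '{' already fixed, a '}'-free prefix changes nothing.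
lemma altGo_skip_some (pre : List Char) (h : '}' ∉ pre) :
    ∀ (rest : List Char) (i cum o : Int) (acc : List (List Int)),
    altGo (pre ++ rest) i cum (some o) acc = altGo rest (i + pre.length) cum (some o) acc := by
  induction pre with
  | nil => intro rest i cum o acc; simp
  | cons c pr ih =>
    intro rest i cum o acc
    have hne : c ≠ '}' := fun hh => h (hh ▸ List.mem_cons_self)
    have hpr : '}' ∉ pr := fun hh => h (List.mem_cons_of_mem _ hh)
    by_cases hc : c = '{'
    · simp only [List.cons_append, altGo, if_pos hc, Option.getD_some]
      rw [ih hpr]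
      rw [show i + 1 + ((pr.length : Nat) : Int) = i + (((c :: pr).length : Nat) : Int) by
        simp only [List.length_cons]; push_cast; ring]
    · simp only [List.cons_append, altGo, if_neg hc, if_neg hne]
      rw [ih hpr]
      rw [show i + 1 + ((pr.length : Nat) : Int) = i + (((c :: pr).length : Nat) : Int) by
        simp only [List.length_cons]; push_cast; ring]

-- Scanning a '}'-free prefix starting with no pending brace records its first '{' (if any).
lemma altGo_skip (pre : List Char) (h : '}' ∉ pre) :
    ∀ (rest : List Char) (i cum : Int) (acc : List (List Int)),
    altGo (pre ++ rest) i cum none acc = altGo rest (i + pre.length) cum (firstBrace pre i) acc := by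
  induction pre with
  | nil => intro rest i cum acc; simp [firstBrace]
  | cons c pr ih =>
    intro rest i cum acc
    have hne : c ≠ '}' := fun hh => h (hh ▸ List.mem_cons_self)
    have hpr : '}' ∉ pr := fun hh => h (List.mem_cons_of_mem _ hh)
    by_cases hc : c = '{'
    · simp only [List.cons_append, altGo, if_pos hc, Option.getD_none, firstBrace]
      rw [altGo_skip_some pr hpr]
      rw [show i + 1 + ((pr.length : Nat) : Int) = i + (((c :: pr).length : Nat) : Int) by
        simp only [List.length_cons]; push_cast; ring]
    · simp only [List.cons_append, altGo, if_neg hc, if_neg hne, firstBrace]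
      rw [ih hpr]
      rw [show i + 1 + ((pr.length : Nat) : Int) = i + (((c :: pr).length : Nat) : Int) by
        simp only [List.length_cons]; push_cast; ring]

-- firstBrace is index? of '{', offset by i.
lemma firstBrace_eq_index? (pre : List Char) : ∀ (i : Int),
    firstBrace pre i = (PySem.List.index? pre '{').map (fun n => i + (n : Int)) := by
  induction pre with
  | nil => intro i; simp [firstBrace, PySem.List.index?]
  | cons c pr ih =>
    intro i
    by_cases hc : c = '{'
    · subst hc
      rw [PySem.List.index?_cons_self]
      simp [firstBrace]
    · rw [PySem.List.index?_cons_of_ne pr hc]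
      simp only [firstBrace, if_neg hc, ih (i + 1)]
      cases PySem.List.index? pr '{' with
      | none => rfl
      | some n => simp; ring

-- preOk survives cutting the brace subsequence at a '}'.
lemma preOk_suffix (p s : List Char) (h : preOk (p ++ '}' :: s) = true) : preOk s = true := by
  rcases hs : s.reverse with _ | ⟨x, _ | ⟨y, r⟩⟩
  · simp [preOk, List.reverse_eq_nil_iff.mp hs]
  · exfalso
    have hrev : (p ++ '}' :: s).reverse = x :: '}' :: p.reverse := by
      simp [hs]
    simp [preOk, hrev] at h
  · have hrev : (p ++ '}' :: s).reverse = x :: y :: (r ++ '}' :: p.reverse) := by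
      simp [hs]
    simp [preOk, hrev] at h
    simp [preOk, hs, h.1]
    exact Or.inr h.2

-- Main loop lemma: A's recursion equals B's scan on every brace-well-formed char list.
lemma aGo_eq_altGo (chars : List Char)
    (hpre : preOk (braceFilter chars) = true) :
    ∀ (ranges : List (List Int)) (cum : Int),
    aGo chars ranges cum = altGo chars 0 cum none ranges := by
  induction chars using (measure List.length).wf.induction with
  | _ chars IH =>
  intro ranges cum
  by_cases hno : ((!chars.contains '{') && (!chars.contains '}')) = true
  · rw [aGo, if_pos hno]
    have hnb : '}' ∉ chars := by
      simp only [Bool.and_eq_true, Bool.not_eq_true', List.contains_eq_mem,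
        decide_eq_false_iff_not] at hno
      exact hno.2
    have := altGo_skip chars hnb [] 0 cum ranges
    simpa [altGo] using this.symm
  · -- both braces present (preOk rules out exactly one)
    have hfe : braceFilter chars ≠ [] := by
      intro hnil
      apply hno
      simp only [Bool.and_eq_true, Bool.not_eq_true', List.contains_eq_mem,
        decide_eq_false_iff_not]
      constructor <;> intro hm
      · have : '{' ∈ braceFilter chars := by simp [braceFilter, List.mem_filter, hm]
        simp [hnil] at this
      · have : '}' ∈ braceFilter chars := by simp [braceFilter, List.mem_filter, hm]
        simp [hnil] at this
    have hrev : ∃ w, (braceFilter chars).reverse = '}' :: '{' :: w := by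
      have htake : (braceFilter chars).reverse.take 2 = ['}', '{'] := by
        simp [preOk, List.isEmpty_iff, hfe] at hpre
        exact hpre
      refine ⟨(braceFilter chars).reverse.drop 2, ?_⟩
      rw [← List.take_append_drop 2 (braceFilter chars).reverse, htake]
      rfl
    obtain ⟨w, hw⟩ := hrev
    have hmem_open : '{' ∈ chars := by
      have : '{' ∈ (braceFilter chars).reverse := by rw [hw]; simp
      rw [List.mem_reverse] at this
      exact (List.mem_filter.mp this).1
    have hmem_close : '}' ∈ chars := by
      have : '}' ∈ (braceFilter chars).reverse := by rw [hw]; simp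
      rw [List.mem_reverse] at this
      exact (List.mem_filter.mp this).1
    obtain ⟨o, ho⟩ := Option.isSome_iff_exists.mp
      ((PySem.List.index?_isSome_iff chars '{').mpr hmem_open)
    obtain ⟨c, hc⟩ := Option.isSome_iff_exists.mp
      ((PySem.List.index?_isSome_iff chars '}').mpr hmem_close)
    rw [aGo, if_neg hno, ho, hc]
    -- decompose at the first '}'
    obtain ⟨pre, suf, hsplit, hlen, hnotin⟩ := (PySem.List.index?_eq_some_iff chars '}' c).mp hc
    -- B side: scan pre, then the '}', then continue on suf
    have hb : altGo chars 0 cum none ranges =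
        altGo suf ((c : Int) + 1) cum none
          (if (o : Int) < (c : Int)
           then ranges ++ [[(o : Int) + cum, (c : Int) + cum + 1]]
           else ranges) := by
      rw [hsplit, altGo_skip pre hnotin, firstBrace_eq_index? pre 0]
      by_cases holt : o < c
      · have hopre : PySem.List.index? pre '{' = some o := by
          have hmempre : '{' ∈ pre := by
            obtain ⟨hk, hko, -⟩ := PySem.List.getElem_of_index?_eq_some ho
            have hkpre : o < pre.length := by omega
            have h1 : chars[o]'hk = (pre ++ '}' :: suf)[o]'(by simpa [← hsplit] using hk) :=
              List.getElem_of_eq hsplit hk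
            have h2 : (pre ++ '}' :: suf)[o]'(by simpa [← hsplit] using hk) = pre[o]'hkpre :=
              List.getElem_append_left hkpre
            have : pre[o]'hkpre = '{' := by rw [← h2, ← h1]; exact hko
            exact this ▸ List.getElem_mem hkpre
          have := PySem.List.index?_append_of_mem ('}' :: suf) hmempre
          rw [← hsplit, ho] at this
          exact this.symm
        rw [hopre]
        simp only [Option.map_some, zero_add, altGo, if_neg (by decide : ¬ ('}' : Char) = '{')]
        have hoc : (o : Int) < (c : Int) := by exact_mod_cast holt
        rw [hlen]
        simp [hoc]
      · -- o > c: no '{' in pre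
        have hopre : PySem.List.index? pre '{' = none := by
          rw [PySem.List.index?_eq_none_iff]
          intro hm
          obtain ⟨k, hk, hkv⟩ := List.mem_iff_getElem.mp hm
          obtain ⟨hk2, -, hmin⟩ := PySem.List.getElem_of_index?_eq_some ho
          have hklt : k < o := by omega
          apply hmin k hklt
          have h1 : chars[k]'(by omega) = (pre ++ '}' :: suf)[k]'(by simp; omega) :=
            List.getElem_of_eq hsplit (by omega)
          rw [h1, List.getElem_append_left hk]
          exact hkv
        rw [hopre]
        simp only [Option.map_none, altGo, if_neg (by decide : ¬ ('}' : Char) = '{')]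
        have hoc : ¬ (o : Int) < (c : Int) := by exact_mod_cast holt
        rw [hlen]
        simp [hoc]
    rw [hb]
    show aGo (List.drop (c + 1) chars)
        (if (o : Int) < (c : Int)
         then ranges ++ [[(o : Int) + cum, (c : Int) + cum + 1]]
         else ranges)
        (cum + ((c : Int) + 1)) =
      altGo suf ((c : Int) + 1) cum none
        (if (o : Int) < (c : Int)
         then ranges ++ [[(o : Int) + cum, (c : Int) + cum + 1]]
         else ranges)
    -- A side: IH on suf
    have hpresuf : preOk (braceFilter suf) = true := by
      apply preOk_suffix (braceFilter pre)
      have hsp : braceFilter chars = braceFilter pre ++ '}' :: braceFilter suf := by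
        rw [hsplit]; simp [braceFilter]
      rw [← hsp]
      exact hpre
    have hdrop : chars.drop (c + 1) = suf := by
      rw [hsplit, ← hlen]
      simp
    have hsuflt : (chars.drop (c + 1)).length < chars.length := by
      have hne : chars ≠ [] := by rintro rfl; simp at hmem_close
      have : 0 < chars.length := List.length_pos_iff.mpr hne
      simp only [List.length_drop]
      omega
    have hIH := IH (chars.drop (c + 1)) hsuflt
    rw [hdrop] at hIH
    rw [hdrop, hIH hpresuf]
    exact altGo_abs suf 0 (cum + ((c : Int) + 1)) ((c : Int) + 1) cum none none _
      (by omega) rfl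

-- ===== VERDICT (by name: the statement is the Claim_ definition above) =====
theorem identify_wildcards_spec : Claim_equal_identify_wildcards := by
  intro values ranges cumulative_idx _ hpre
  unfold Spec_identify_wildcards identify_wildcards identify_wildcards_alt
  exact aGo_eq_altGo values.toList hpre ranges cumulative_idx
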